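-- pv_equiv track=rewrite | github.com/park-jun-woo/geul-entity | scripts/sidx_encode_attrs.py | encode_human_attrs
-- ===== SOURCE A (Python) =====
-- def encode_human_attrs(qid, triples, codebook_maps):
--     """Human (0x00) 타입 48비트 속성 인코딩"""
--     attrs = 0
--
--     # P21 (gender) → offset 27, 2비트
--     gender_map = {'Q6581097': 1, 'Q6581072': 2, 'Q1097630': 3}  # male, female, intersex
--     for subj, prop, obj in triples:
--         if prop == 'P21' and obj in gender_map:
--             attrs |= (gender_map[obj] << 27)
--             break
--
--     # P27 (country of citizenship) → offset 11, 8비트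
--     country_map = codebook_maps.get('country', {})
--     for subj, prop, obj in triples:
--         if prop == 'P27' and obj in country_map:
--             attrs |= (country_map[obj] << 11)
--             break
--
--     # P106 (occupation) → offset 5, 6비트
--     occupation_map = codebook_maps.get('occupation', {})
--     for subj, prop, obj in triples:
--         if prop == 'P106' and obj in occupation_map:
--             attrs |= (occupation_map[obj] << 5)
--             break
--
--     # P1412 (languages spoken) → offset 32, 6비트
--     language_map = codebook_maps.get('language', {})
--     for subj, prop, obj in triples:
--         if prop == 'P1412' and obj in language_map:
--             attrs |= (language_map[obj] << 32)
--             break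
--
--     # P569 (date of birth) → era at offset 19, 4비트
--     for subj, prop, obj in triples:
--         if prop == 'P569' and obj:
--             try:
--                 # +1990-01-01T00:00:00Z 형식
--                 year = int(obj[1:5]) if obj.startswith('+') else int(obj[0:4])
--                 era = encode_era(year)
--                 attrs |= (era << 19)
--             except:
--                 pass
--             break
--
--     return attrs
--
-- def encode_era(year):
--     """연도를 4비트 era 코드로 변환"""
--     if year < 0:
--         return 0  # 고대
--     elif year < 500:
--         return 1  # 고대
--     elif year < 1000:
--         return 2  # 중세 초기
--     elif year < 1500:
--         return 3  # 중세
--     elif year < 1700: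
--         return 4  # 근세
--     elif year < 1800:
--         return 5  # 18세기
--     elif year < 1850:
--         return 6  # 19세기 전반
--     elif year < 1900:
--         return 7  # 19세기 후반
--     elif year < 1950:
--         return 8  # 20세기 전반
--     elif year < 1970:
--         return 9  # 1950-1970
--     elif year < 1990:
--         return 10  # 1970-1990
--     elif year < 2000:
--         return 11  # 1990s
--     elif year < 2010:
--         return 12  # 2000s
--     elif year < 2020:
--         return 13  # 2010s
--     else:
--         return 14  # 2020s+
-- ===== SOURCE B (Python) =====
-- def encode_human_attrs(qid, triples, codebook_maps):
--     """Single pass over triples with done-flags per property (A makes five passes)."""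
--     gender_map = {'Q6581097': 1, 'Q6581072': 2, 'Q1097630': 3}
--     country_map = codebook_maps.get('country', {})
--     occupation_map = codebook_maps.get('occupation', {})
--     language_map = codebook_maps.get('language', {})
--     attrs = 0
--     g = c = o = l = b = False
--     for subj, prop, obj in triples:
--         if g and c and o and l and b:
--             break
--         if (not g) and prop == 'P21' and obj in gender_map:
--             attrs |= gender_map[obj] << 27
--             g = True
--         elif (not c) and prop == 'P27' and obj in country_map:
--             attrs |= country_map[obj] << 11
--             c = True
--         elif (not o) and prop == 'P106' and obj in occupation_map:
--             attrs |= occupation_map[obj] << 5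
--             o = True
--         elif (not l) and prop == 'P1412' and obj in language_map:
--             attrs |= language_map[obj] << 32
--             l = True
--         elif (not b) and prop == 'P569' and obj:
--             b = True
--             try:
--                 year = int(obj[1:5]) if obj.startswith('+') else int(obj[0:4])
--                 attrs |= _era_code(year) << 19
--             except ValueError:
--                 pass
--     return attrs
--
--
-- _ERA_BOUNDS = [500, 1000, 1500, 1700, 1800, 1850, 1900, 1950, 1970, 1990, 2000, 2010, 2020]
--
--
-- def _era_code(year):
--     if year < 0:
--         return 0
--     code = 1
--     for bound in _ERA_BOUNDS:
--         if year < bound: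
--             return code
--         code += 1
--     return 14
-- ===== Notes on version B (the rewrite author's own statement) =====
-- stated objective: alternative
-- what changed: Replaces A's five separate scans of the triples list (one per property) by a single pass with per-property done-flags and an early break, and replaces the era if-chain by a threshold-table scan.
import Mathlib
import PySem

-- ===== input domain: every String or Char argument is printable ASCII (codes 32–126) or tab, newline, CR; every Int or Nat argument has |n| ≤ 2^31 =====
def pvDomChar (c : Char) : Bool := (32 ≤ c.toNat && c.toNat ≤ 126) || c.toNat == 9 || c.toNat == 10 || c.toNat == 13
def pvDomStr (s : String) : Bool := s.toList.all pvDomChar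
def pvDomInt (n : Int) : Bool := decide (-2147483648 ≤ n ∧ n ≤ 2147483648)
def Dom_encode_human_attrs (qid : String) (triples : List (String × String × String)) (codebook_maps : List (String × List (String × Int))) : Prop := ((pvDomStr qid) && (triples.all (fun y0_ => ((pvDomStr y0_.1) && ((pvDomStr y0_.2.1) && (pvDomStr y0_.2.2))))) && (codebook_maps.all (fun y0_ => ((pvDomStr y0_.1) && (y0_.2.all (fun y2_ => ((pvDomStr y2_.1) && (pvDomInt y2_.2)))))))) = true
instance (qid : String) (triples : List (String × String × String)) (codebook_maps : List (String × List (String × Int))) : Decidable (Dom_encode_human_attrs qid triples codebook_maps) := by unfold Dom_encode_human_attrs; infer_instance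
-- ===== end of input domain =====

-- B replaces A's five separate scans of the triples list by a single pass with
-- per-property done-flags (and a threshold table for the era code); objective: alternative.

-- ===== shared primitive helpers (ports of Python dict lookup / the year-parse line, used by both ports) =====

-- Python dict as association list: first-match lookup ('k in d' / 'd[k]' / 'd.get(k, dflt)')
def pvAssocGet {α : Type} : List (String × α) → String → Option α
  | [], _ => none
  | (k, v) :: rest, x => if k == x then some v else pvAssocGet rest x

-- {'Q6581097': 1, 'Q6581072': 2, 'Q1097630': 3}
def pvGenderList : List (String × Int) := [("Q6581097", 1), ("Q6581072", 2), ("Q1097630", 3)]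

-- int(obj[1:5]) if obj.startswith('+') else int(obj[0:4]); none = ValueError
def pvYear? (ob : String) : Option Int :=
  if PySem.Str.startswith ob "+" then PySem.Int.ofStr? (PySem.Str.slice ob (some 1) (some 5))
  else PySem.Int.ofStr? (PySem.Str.slice ob (some 0) (some 4))

-- ===== PORT A =====

-- encode_era's if-chain
def encode_era (year : Int) : Int :=
  if year < 0 then 0
  else if year < 500 then 1
  else if year < 1000 then 2
  else if year < 1500 then 3
  else if year < 1700 then 4
  else if year < 1800 then 5
  else if year < 1850 then 6
  else if year < 1900 then 7
  else if year < 1950 then 8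
  else if year < 1970 then 9
  else if year < 1990 then 10
  else if year < 2000 then 11
  else if year < 2010 then 12
  else if year < 2020 then 13
  else 14

-- one of A's four identical 'for … if prop == X and obj in map: attrs |= map[obj] << off; break' loops
def pvA_scan (pr : String) (m : List (String × Int)) (off : Nat) (attrs : Int) :
    List (String × String × String) → Int
  | [] => attrs
  | (_, p, ob) :: rest =>
    if p == pr && (pvAssocGet m ob).isSome then
      PySem.Int.bor attrs (((pvAssocGet m ob).getD 0) <<< off)
    else pvA_scan pr m off attrs rest

-- A's P569 loop (break fires on first truthy obj even if int() fails)
def pvA_birth (attrs : Int) : List (String × String × String) → Int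
  | [] => attrs
  | (_, p, ob) :: rest =>
    if p == "P569" && ob != "" then
      match pvYear? ob with
      | some y => PySem.Int.bor attrs ((encode_era y) <<< (19:Nat))
      | none => attrs
    else pvA_birth attrs rest

def encode_human_attrs (qid : String) (triples : List (String × String × String)) (codebook_maps : List (String × List (String × Int))) : Int :=
  let a1 := pvA_scan "P21" pvGenderList 27 0 triples
  let cm := (pvAssocGet codebook_maps "country").getD []
  let a2 := pvA_scan "P27" cm 11 a1 triples
  let om := (pvAssocGet codebook_maps "occupation").getD []
  let a3 := pvA_scan "P106" om 5 a2 triples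
  let lm := (pvAssocGet codebook_maps "language").getD []
  let a4 := pvA_scan "P1412" lm 32 a3 triples
  pvA_birth a4 triples

-- ===== PORT B =====

def pvB_bounds : List Int := [500, 1000, 1500, 1700, 1800, 1850, 1900, 1950, 1970, 1990, 2000, 2010, 2020]

def pvB_eraGo (year : Int) (code : Int) : List Int → Int
  | [] => 14
  | bd :: rest => if year < bd then code else pvB_eraGo year (code + 1) rest

def pvB_era (year : Int) : Int :=
  if year < 0 then 0 else pvB_eraGo year 1 pvB_bounds

-- B's single pass: g c o l b are the done-flags for P21/P27/P106/P1412/P569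
def pvB_go (cm om lm : List (String × Int)) (attrs : Int) (g c o l b : Bool) :
    List (String × String × String) → Int
  | [] => attrs
  | (_, p, ob) :: rest =>
    if g && c && o && l && b then attrs
    else if !g && (p == "P21") && (pvAssocGet pvGenderList ob).isSome then
      pvB_go cm om lm (PySem.Int.bor attrs (((pvAssocGet pvGenderList ob).getD 0) <<< (27:Nat))) true c o l b rest
    else if !c && (p == "P27") && (pvAssocGet cm ob).isSome then
      pvB_go cm om lm (PySem.Int.bor attrs (((pvAssocGet cm ob).getD 0) <<< (11:Nat))) g true o l b rest
    else if !o && (p == "P106") && (pvAssocGet om ob).isSome then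
      pvB_go cm om lm (PySem.Int.bor attrs (((pvAssocGet om ob).getD 0) <<< (5:Nat))) g c true l b rest
    else if !l && (p == "P1412") && (pvAssocGet lm ob).isSome then
      pvB_go cm om lm (PySem.Int.bor attrs (((pvAssocGet lm ob).getD 0) <<< (32:Nat))) g c o true b rest
    else if !b && (p == "P569") && ob != "" then
      pvB_go cm om lm
        (match pvYear? ob with
         | some y => PySem.Int.bor attrs ((pvB_era y) <<< (19:Nat))
         | none => attrs) g c o l true rest
    else pvB_go cm om lm attrs g c o l b rest

def encode_human_attrs_alt (qid : String) (triples : List (String × String × String)) (codebook_maps : List (String × List (String × Int))) : Int :=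
  let cm := (pvAssocGet codebook_maps "country").getD []
  let om := (pvAssocGet codebook_maps "occupation").getD []
  let lm := (pvAssocGet codebook_maps "language").getD []
  pvB_go cm om lm 0 false false false false false triples

-- ===== PRECONDITION & SPEC =====
def Spec_encode_human_attrs (qid : String) (triples : List (String × String × String)) (codebook_maps : List (String × List (String × Int))) (out : Int) : Prop := out = encode_human_attrs_alt qid triples codebook_maps
instance (qid : String) (triples : List (String × String × String)) (codebook_maps : List (String × List (String × Int))) (out : Int) : Decidable (Spec_encode_human_attrs qid triples codebook_maps out) := by unfold Spec_encode_human_attrs; infer_instance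

-- ===== CLAIM (what is proved, stated in full; the proofs are below) =====
def Claim_equal_encode_human_attrs : Prop := ∀ (qid : String) (triples : List (String × String × String)) (codebook_maps : List (String × List (String × Int))), Dom_encode_human_attrs qid triples codebook_maps → Spec_encode_human_attrs qid triples codebook_maps (encode_human_attrs qid triples codebook_maps)

-- ===== LEMMAS AND PROOFS =====

-- PySem.Int.bor is Mathlib's Int.lor
theorem pv_ldiff_add_land (n m : Nat) : Nat.ldiff n m + (n &&& m) = n := by
  induction n using Nat.binaryRec generalizing m with
  | zero => simp [Nat.ldiff, Nat.bitwise_zero_left]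
  | bit b n ih =>
    induction m using Nat.binaryRec with
    | zero => simp [Nat.ldiff, Nat.bitwise_zero_right]
    | bit c m _ =>
      rw [Nat.ldiff_bit, Nat.land_bit, Nat.bit_val, Nat.bit_val, Nat.bit_val]
      have h := ih m
      cases b <;> cases c <;> simp <;> omega

theorem pv_bor_eq_lor (a b : Int) : PySem.Int.bor a b = Int.lor a b := by
  have hsub : ∀ x y : Nat, x - (x &&& y) = Nat.ldiff x y := by
    intro x y; have := pv_ldiff_add_land x y; omega
  rcases a with m | m <;> rcases b with n | n <;>
    simp [PySem.Int.bor, Int.lor, Int.negSucc_eq, hsub] <;> omega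

theorem pv_lor_assoc (a b c : Int) : Int.lor (Int.lor a b) c = Int.lor a (Int.lor b c) := by
  rcases a with m | m <;> rcases b with n | n <;> rcases c with k | k <;>
    simp only [Int.lor, Int.negSucc.injEq, Int.ofNat_inj] <;>
    first
      | exact Nat.lor_assoc m n k
      | (apply Nat.eq_of_testBit_eq; intro i;
         simp only [Nat.testBit_ldiff, Nat.testBit_lor, Nat.testBit_land];
         cases Nat.testBit m i <;> cases Nat.testBit n i <;> cases Nat.testBit k i <;> rfl)

theorem pv_bor_assoc (a b c : Int) :
    PySem.Int.bor (PySem.Int.bor a b) c = PySem.Int.bor a (PySem.Int.bor b c) := by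
  simp only [pv_bor_eq_lor, pv_lor_assoc]

theorem pv_bor_right_comm (a b c : Int) :
    PySem.Int.bor (PySem.Int.bor a b) c = PySem.Int.bor (PySem.Int.bor a c) b := by
  rw [pv_bor_assoc, pv_bor_assoc, PySem.Int.bor_comm b c]

theorem pv_bor_ite (t : Prop) [Decidable t] (x y v : Int) :
    (if t then PySem.Int.bor x v else PySem.Int.bor y v) = PySem.Int.bor (if t then x else y) v := by
  split <;> rfl

-- B's threshold table computes A's era if-chain
theorem pv_era_eq (y : Int) : pvB_era y = encode_era y := by
  unfold pvB_era pvB_bounds encode_era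
  simp only [pvB_eraGo]
  norm_num

-- a first-match scan commutes with OR-ing a constant into the accumulator
theorem pvA_scan_pull (pr : String) (m : List (String × Int)) (off : Nat) :
    ∀ (ts : List (String × String × String)) (x v : Int),
      pvA_scan pr m off (PySem.Int.bor x v) ts = PySem.Int.bor (pvA_scan pr m off x ts) v := by
  intro ts
  induction ts with
  | nil => intro x v; rfl
  | cons t rest ih =>
    obtain ⟨s, p, ob⟩ := t
    intro x v
    by_cases h : (p == pr && (pvAssocGet m ob).isSome) = true
    · simp [pvA_scan, h, pv_bor_right_comm]
    · simp [pvA_scan, h, ih]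

-- what A's five loops compute, with a done-flag disabling each loop
def pvRest (cm om lm : List (String × Int)) (attrs : Int) (g c o l b : Bool)
    (ts : List (String × String × String)) : Int :=
  let a1 := if g then attrs else pvA_scan "P21" pvGenderList 27 attrs ts
  let a2 := if c then a1 else pvA_scan "P27" cm 11 a1 ts
  let a3 := if o then a2 else pvA_scan "P106" om 5 a2 ts
  let a4 := if l then a3 else pvA_scan "P1412" lm 32 a3 ts
  if b then a4 else pvA_birth a4 ts

theorem pvB_go_eq (cm om lm : List (String × Int)) :
    ∀ (ts : List (String × String × String)) (attrs : Int) (g c o l b : Bool),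
      pvB_go cm om lm attrs g c o l b ts = pvRest cm om lm attrs g c o l b ts := by
  intro ts
  induction ts with
  | nil =>
    intro attrs g c o l b
    simp [pvB_go, pvRest, pvA_scan, pvA_birth]
  | cons t rest ih =>
    obtain ⟨s, p, ob⟩ := t
    intro attrs g c o l b
    by_cases hall : (g && c && o && l && b) = true
    · simp only [Bool.and_eq_true] at hall
      obtain ⟨⟨⟨⟨hg, hc⟩, ho⟩, hl⟩, hb⟩ := hall
      subst hg hc ho hl hb
      simp [pvB_go, pvRest]
    · by_cases h1 : (!g && (p == "P21") && (pvAssocGet pvGenderList ob).isSome) = true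
      · simp only [Bool.and_eq_true, Bool.not_eq_true'] at h1
        obtain ⟨⟨hg, hp⟩, hy⟩ := h1
        rw [beq_iff_eq] at hp
        subst hg hp
        rw [show pvB_go cm om lm attrs false c o l b ((s, "P21", ob) :: rest)
              = pvB_go cm om lm (PySem.Int.bor attrs (((pvAssocGet pvGenderList ob).getD 0) <<< (27:Nat))) true c o l b rest
            from by simp [pvB_go, hy], ih]
        simp [pvRest, pvA_scan, pvA_birth, hy]
      · by_cases h2 : (!c && (p == "P27") && (pvAssocGet cm ob).isSome) = true
        · simp only [Bool.and_eq_true, Bool.not_eq_true'] at h2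
          obtain ⟨⟨hc, hp⟩, hy⟩ := h2
          rw [beq_iff_eq] at hp
          subst hc hp
          rw [show pvB_go cm om lm attrs g false o l b ((s, "P27", ob) :: rest)
                = pvB_go cm om lm (PySem.Int.bor attrs (((pvAssocGet cm ob).getD 0) <<< (11:Nat))) g true o l b rest
              from by simp [pvB_go, hy], ih]
          simp [pvRest, pvA_scan, pvA_birth, hy, pvA_scan_pull, pv_bor_ite]
        · by_cases h3 : (!o && (p == "P106") && (pvAssocGet om ob).isSome) = true
          · simp only [Bool.and_eq_true, Bool.not_eq_true'] at h3
            obtain ⟨⟨ho, hp⟩, hy⟩ := h3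
            rw [beq_iff_eq] at hp
            subst ho hp
            rw [show pvB_go cm om lm attrs g c false l b ((s, "P106", ob) :: rest)
                  = pvB_go cm om lm (PySem.Int.bor attrs (((pvAssocGet om ob).getD 0) <<< (5:Nat))) g c true l b rest
                from by simp [pvB_go, hy], ih]
            simp [pvRest, pvA_scan, pvA_birth, hy, pvA_scan_pull, pv_bor_ite]
          · by_cases h4 : (!l && (p == "P1412") && (pvAssocGet lm ob).isSome) = true
            · simp only [Bool.and_eq_true, Bool.not_eq_true'] at h4
              obtain ⟨⟨hl, hp⟩, hy⟩ := h4
              rw [beq_iff_eq] at hp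
              subst hl hp
              rw [show pvB_go cm om lm attrs g c o false b ((s, "P1412", ob) :: rest)
                    = pvB_go cm om lm (PySem.Int.bor attrs (((pvAssocGet lm ob).getD 0) <<< (32:Nat))) g c o true b rest
                  from by simp [pvB_go, hy], ih]
              simp [pvRest, pvA_scan, pvA_birth, hy, pvA_scan_pull, pv_bor_ite]
            · by_cases h5 : (!b && (p == "P569") && ob != "") = true
              · simp only [Bool.and_eq_true, Bool.not_eq_true'] at h5
                obtain ⟨⟨hb, hp⟩, hne⟩ := h5
                rw [beq_iff_eq] at hp
                subst hb hp
                rw [show pvB_go cm om lm attrs g c o l false ((s, "P569", ob) :: rest)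
                      = pvB_go cm om lm
                          (match pvYear? ob with
                           | some y => PySem.Int.bor attrs ((pvB_era y) <<< (19:Nat))
                           | none => attrs) g c o l true rest
                    from by simp [pvB_go, hne], ih]
                rcases hyr : pvYear? ob with _ | y
                · simp [pvRest, pvA_scan, pvA_birth, hne, hyr]
                · simp [pvRest, pvA_scan, pvA_birth, hne, hyr, pv_era_eq,
                        pvA_scan_pull, pv_bor_ite]
              · rw [show pvB_go cm om lm attrs g c o l b ((s, p, ob) :: rest)
                      = pvB_go cm om lm attrs g c o l b rest
                    from by simp [pvB_go, hall, h1, h2, h3, h4, h5], ih]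
                clear ih hall
                simp only [Bool.and_eq_true, not_and, Bool.not_eq_true', Bool.not_eq_true] at h1 h2 h3 h4 h5
                cases g <;> cases c <;> cases o <;> cases l <;> cases b <;>
                  simp_all [pvRest, pvA_scan, pvA_birth] <;>
                  split_ifs <;> simp_all


-- ===== VERDICT (by name: the statement is the Claim_ definition above) =====
theorem encode_human_attrs_spec : Claim_equal_encode_human_attrs := by
  intro qid triples codebook_maps _
  unfold Spec_encode_human_attrs encode_human_attrs encode_human_attrs_alt
  rw [pvB_go_eq]
  simp [pvRest]
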